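-- pv_equiv track=rewrite | github.com/cff29546/pzmap2dzi | pzmap2dzi/render_impl/streets.py | max_span
-- ===== SOURCE A (Python) =====
-- def max_span(mark):
--     points = mark.get('points', [])
--     if not points:
--         return 0
--     min_x = min(p['x'] for p in points)
--     max_x = max(p['x'] for p in points)
--     min_y = min(p['y'] for p in points)
--     max_y = max(p['y'] for p in points)
--     span_x = max_x - min_x
--     span_y = max_y - min_y
--     return max(span_x, span_y)
-- ===== SOURCE B (Python) =====
-- def max_span(mark):
--     points = mark.get('points', [])
--     if not points:
--         return 0
--     xs = sorted(p['x'] for p in points)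
--     ys = sorted(p['y'] for p in points)
--     return max(xs[-1] - xs[0], ys[-1] - ys[0])
-- ===== Notes on version B (the rewrite author's own statement) =====
-- stated objective: alternative
-- what changed: B sorts the x- and y-coordinate lists and reads each extreme off the sorted list's endpoints (sorted[-1] - sorted[0]), instead of A's four min()/max() comprehension passes.
import Mathlib
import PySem

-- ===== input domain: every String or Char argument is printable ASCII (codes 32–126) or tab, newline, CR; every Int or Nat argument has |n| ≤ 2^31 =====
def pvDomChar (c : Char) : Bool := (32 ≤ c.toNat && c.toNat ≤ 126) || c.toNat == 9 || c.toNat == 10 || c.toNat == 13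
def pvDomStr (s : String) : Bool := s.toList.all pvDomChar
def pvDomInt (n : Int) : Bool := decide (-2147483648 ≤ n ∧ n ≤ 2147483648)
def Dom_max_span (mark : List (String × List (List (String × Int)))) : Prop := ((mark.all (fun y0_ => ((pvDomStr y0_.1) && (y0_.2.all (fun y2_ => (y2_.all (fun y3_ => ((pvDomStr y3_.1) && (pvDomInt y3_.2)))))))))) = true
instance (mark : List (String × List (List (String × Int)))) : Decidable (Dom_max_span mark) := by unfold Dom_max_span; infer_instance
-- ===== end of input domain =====

-- B sorts the coordinate lists and takes the spans from the sorted endpoints instead of A's four min/max passes (alternative algorithm, same result).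
-- shared dict primitive: first-match lookup with a default (Python d.get(k, dflt) / d[k] under Pre_)
def pvLookup {α : Type} (d : List (String × α)) (k : String) (dflt : α) : α :=
  match d.find? (fun kv => kv.1 == k) with
  | some kv => kv.2
  | none => dflt

-- ===== PORT A =====
def max_span (mark : List (String × List (List (String × Int)))) : Int :=
  let points := pvLookup mark "points" []
  if points = [] then 0
  else
    let min_x := (PySem.List.min? (points.map (fun p => pvLookup p "x" 0)) (fun v => v)).getD 0
    let max_x := (PySem.List.max? (points.map (fun p => pvLookup p "x" 0)) (fun v => v)).getD 0
    let min_y := (PySem.List.min? (points.map (fun p => pvLookup p "y" 0)) (fun v => v)).getD 0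
    let max_y := (PySem.List.max? (points.map (fun p => pvLookup p "y" 0)) (fun v => v)).getD 0
    let span_x := max_x - min_x
    let span_y := max_y - min_y
    max span_x span_y

-- ===== PORT B =====
def max_span_alt (mark : List (String × List (List (String × Int)))) : Int :=
  let points := pvLookup mark "points" []
  if points = [] then 0
  else
    let xs := PySem.List.sorted (points.map (fun p => pvLookup p "x" 0)) (fun v => v) false
    let ys := PySem.List.sorted (points.map (fun p => pvLookup p "y" 0)) (fun v => v) false
    max ((PySem.List.pyGet? xs (-1)).getD 0 - (PySem.List.pyGet? xs 0).getD 0)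
        ((PySem.List.pyGet? ys (-1)).getD 0 - (PySem.List.pyGet? ys 0).getD 0)

-- ===== PRECONDITION & SPEC =====
-- Pre_: every point carries both keys "x" and "y" (otherwise Python A raises KeyError)
def Pre_max_span (mark : List (String × List (List (String × Int)))) : Prop :=
  ∀ p ∈ pvLookup mark "points" [],
    (p.find? (fun kv => kv.1 == "x")).isSome = true ∧ (p.find? (fun kv => kv.1 == "y")).isSome = true
instance (mark : List (String × List (List (String × Int)))) : Decidable (Pre_max_span mark) := by unfold Pre_max_span; infer_instance

def pvWitness_max_span : (List (String × List (List (String × Int)))) :=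
  [("points", [[("x", 3), ("y", 1)], [("x", 0), ("y", 5)]])]

def Spec_max_span (mark : List (String × List (List (String × Int)))) (out : Int) : Prop := out = max_span_alt mark
instance (mark : List (String × List (List (String × Int)))) (out : Int) : Decidable (Spec_max_span mark out) := by unfold Spec_max_span; infer_instance

-- ===== CLAIM (what is proved, stated in full; the proofs are below) =====
def Claim_equal_max_span : Prop := ∀ (mark : List (String × List (List (String × Int)))), Dom_max_span mark → Pre_max_span mark → Spec_max_span mark (max_span mark)

-- ===== LEMMAS AND PROOFS =====

lemma sorted_head_eq_min (l : List Int) (h : l ≠ []) :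
    (PySem.List.pyGet? (PySem.List.sorted l (fun v => v) false) 0).getD 0
      = (PySem.List.min? l (fun v => v)).getD 0 := by
  obtain ⟨a, t, rfl⟩ := List.exists_cons_of_ne_nil h
  have hs : PySem.List.sorted (a :: t) (fun v => v) false ≠ [] := by
    simp [PySem.List.sorted_eq_nil_iff]
  obtain ⟨m, t', hm⟩ := List.exists_cons_of_ne_nil hs
  have hmem : m ∈ (a :: t) := by
    have := PySem.List.mem_sorted (xs := a :: t) (key := fun v => v) (rev := false) (x := m)
    rw [hm] at this; simp at this; exact List.mem_cons.mpr this
  have hle : ∀ y ∈ (a :: t), m ≤ y := fun y hy => by simpa using PySem.List.key_head_sorted_le _ _ hm y hy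
  have h1 : t.foldl min a ≤ a ∧ ∀ y ∈ t, t.foldl min a ≤ y := PySem.List.foldl_min_le t a
  have h2 : t.foldl min a = a ∨ t.foldl min a ∈ t := PySem.List.foldl_min_mem t a
  rw [hm, PySem.List.min?_id_cons]
  simp only [PySem.List.pyGet?]
  have : m = t.foldl min a := by
    apply le_antisymm
    · rcases h2 with h2 | h2
      · rw [h2]; exact hle a (by simp)
      · exact hle _ (by simp [h2])
    · rcases List.mem_cons.mp hmem with h3 | h3
      · rw [h3]; exact h1.1
      · exact h1.2 m h3
  simp [PySem.List.pyIdx?, this]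

lemma sorted_last_eq_max (l : List Int) (h : l ≠ []) :
    (PySem.List.pyGet? (PySem.List.sorted l (fun v => v) false) (-1)).getD 0
      = (PySem.List.max? l (fun v => v)).getD 0 := by
  obtain ⟨a, t, rfl⟩ := List.exists_cons_of_ne_nil h
  have hlen : (PySem.List.sorted (a :: t) (fun v => v) false).length = t.length + 1 := by
    simp [PySem.List.length_sorted]
  have hlt : t.length < (PySem.List.sorted (a :: t) (fun v => v) false).length := by omega
  have hget : PySem.List.pyGet? (PySem.List.sorted (a :: t) (fun v => v) false) (-1)
      = some (PySem.List.sorted (a :: t) (fun v => v) false)[t.length] := by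
    simp [PySem.List.pyGet?, PySem.List.pyIdx?, hlen]
  have hmem : (PySem.List.sorted (a :: t) (fun v => v) false)[t.length] ∈ (a :: t) := by
    rw [← PySem.List.mem_sorted (key := fun v => v) (rev := false)]
    exact List.getElem_mem hlt
  have hmax : ∀ y ∈ (a :: t), y ≤ (PySem.List.sorted (a :: t) (fun v => v) false)[t.length] := by
    intro y hy
    rw [← PySem.List.mem_sorted (key := fun v => v) (rev := false)] at hy
    obtain ⟨i, hi, rfl⟩ := List.mem_iff_getElem.mp hy
    exact PySem.List.sorted_id_getElem_mono (xs := a :: t) (p := i) (q := t.length)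
      (by omega) hlt
  have h1 : a ≤ t.foldl max a ∧ ∀ y ∈ t, y ≤ t.foldl max a := PySem.List.le_foldl_max t a
  have h2 : t.foldl max a = a ∨ t.foldl max a ∈ t := PySem.List.foldl_max_mem t a
  rw [hget, PySem.List.max?_id_cons]
  have heq : (PySem.List.sorted (a :: t) (fun v => v) false)[t.length] = t.foldl max a := by
    apply le_antisymm
    · rcases List.mem_cons.mp hmem with h3 | h3
      · rw [h3]; exact h1.1
      · exact h1.2 _ h3
    · rcases h2 with h2 | h2
      · rw [h2]; exact hmax a (by simp)
      · exact hmax _ (by simp [h2])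
  simp [heq]

-- ===== VERDICT (by name: the statement is the Claim_ definition above) =====
theorem max_span_spec : Claim_equal_max_span := by
  intro mark _ _
  unfold Spec_max_span max_span max_span_alt
  cases h : pvLookup mark "points" [] with
  | nil => simp
  | cons p rest =>
      have hne : (p :: rest).map (fun q => pvLookup q "x" 0) ≠ [] := by simp
      have hne' : (p :: rest).map (fun q => pvLookup q "y" 0) ≠ [] := by simp
      simp only [reduceCtorEq, if_false,
        sorted_head_eq_min _ hne, sorted_last_eq_max _ hne,
        sorted_head_eq_min _ hne', sorted_last_eq_max _ hne']
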